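-- pv_equiv track=rewrite | github.com/Fedjmike/ngen | language-grids.py | combine_repeats
-- ===== SOURCE A (Python) =====
-- from itertools import count, zip_longest
--
-- def unpack_cell(cell):
--     return cell if isinstance(cell, list) else (cell, 1, 1)
--
-- def combine_repeats(grid, odd_vertical_combine=False):
--     def combine_vertically(grid):
--         newgrid = []
--
--         for column in zip(*grid):
--             newcolumn = []
--
--             for rowno, cell in enumerate(column):
--                 newcell = [cell, 1, 1]
--
--                 try:
--                     for backtrack in count(-1, -1):
--                         if newcolumn[backtrack]:
--                             if newcolumn[backtrack][0] == cell and (rowno % 2 == 1 or odd_vertical_combine):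
--                                 newcolumn[backtrack][2] += 1
--                                 newcell = None
--
--                             break
--
--                 except IndexError:
--                     pass
--
--                 newcolumn.append(newcell)
--
--             newgrid.append(newcolumn)
--
--         return [list(x) for x in zip(*newgrid)]
--
--     def combine_horizontally(grid):
--         for row in grid:
--             for colno, cell in enumerate(row):
--                 cell, colspan, rowspan = unpack_cell(cell)
--
--                 try:
--                     for backtrack in count(-1, -1):
--                         if row[colno-backtrack]:
--                             if row[colno-backtrack][0] == cell and row[colno-backtrack][2] == rowspan:
--                                 row[colno-backtrack][1] += colspan
--                                 row[colno] = None
--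
--                             break
--
--                 except IndexError:
--                     pass
--
--         return grid
--
--     return combine_horizontally(combine_vertically(grid))
-- ===== SOURCE B (Python) =====
-- # One pass per column/row: A rescans None runs backwards/forwards for every cell;
-- # B carries the current run and emits it (head cell, then its padding Nones) only
-- # when the run closes, so no rescanning ever happens.
--
-- def _vmerge(column, odd_vertical_combine):
--     if not column:
--         return []
--     out = []
--     v0, n = column[0], 1          # pending run: value, rowspan
--     for rowno in range(1, len(column)):
--         v = column[rowno]
--         if v0 == v and (rowno % 2 == 1 or odd_vertical_combine):
--             n += 1
--         else:
--             out.append([v0, 1, n])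
--             out.extend([None] * (n - 1))
--             v0, n = v, 1
--     out.append([v0, 1, n])
--     out.extend([None] * (n - 1))
--     return out
--
-- def _hmerge(row):
--     out, i, n = [], 0, len(row)
--     while i < n and row[i] is None:   # leading Nones
--         out.append(None)
--         i += 1
--     if i == n:
--         return out
--     (v, c, r), gap = row[i], 0        # pending cell and Nones counted after it
--     for cell in row[i + 1:]:
--         if cell is None:
--             gap += 1
--         elif cell[0] == v and cell[2] == r:
--             out.append(None)
--             out.extend([None] * gap)
--             c, gap = c + cell[1], 0
--         else:
--             out.append([v, c, r])
--             out.extend([None] * gap)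
--             (v, c, r), gap = cell, 0
--     out.append([v, c, r])
--     out.extend([None] * gap)
--     return out
--
-- def combine_repeats(grid, odd_vertical_combine=False):
--     ncols = min((len(row) for row in grid), default=0)
--     if ncols == 0:
--         return []
--     columns = [_vmerge([row[c] for row in grid], odd_vertical_combine)
--                for c in range(ncols)]
--     return [_hmerge([col[r] for col in columns]) for r in range(len(grid))]
-- ===== Notes on version B (the rewrite author's own statement) =====
-- stated objective: alternative
-- what changed: A rescans the run of Nones behind (vertical) or ahead of (horizontal) every cell to find the neighbouring non-None cell and mutates it; B makes one pass per column/row carrying the current run (value, span, None-gap) and emits each run head-first with its padding when it closes, so no rescanning happens.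
import Mathlib
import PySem

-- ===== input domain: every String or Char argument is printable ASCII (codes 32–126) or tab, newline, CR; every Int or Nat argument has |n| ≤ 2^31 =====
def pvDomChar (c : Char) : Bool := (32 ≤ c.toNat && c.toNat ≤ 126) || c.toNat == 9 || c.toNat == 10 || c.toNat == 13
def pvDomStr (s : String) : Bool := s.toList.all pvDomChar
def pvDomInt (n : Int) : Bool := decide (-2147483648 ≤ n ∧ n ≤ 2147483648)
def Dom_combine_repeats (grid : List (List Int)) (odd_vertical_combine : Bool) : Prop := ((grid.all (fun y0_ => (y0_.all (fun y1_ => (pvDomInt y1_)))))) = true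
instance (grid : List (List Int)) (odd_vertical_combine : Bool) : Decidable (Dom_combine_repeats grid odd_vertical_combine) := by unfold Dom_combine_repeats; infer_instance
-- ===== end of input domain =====

-- B replaces A's backward/forward rescans over None runs by single passes that
-- carry the current run and emit it head-first with its padding when it closes.
-- A mutates its intermediate rows in place but not the input; only the return
-- value is compared here (B mutates nothing).

-- ===== PORT A =====

-- zip(*g): truncate to the shortest row; the default d is never the value used
-- (every index taken is < every row's length), it only keeps getD total.
def transposeZip {α : Type} (d : α) (g : List (List α)) : List (List α) :=
  match g with
  | [] => []
  | _ :: _ =>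
    let n := ((g.map List.length).min?).getD 0
    (List.range n).map (fun i => g.map (fun row => row.getD i d))

-- the `for backtrack in count(-1,-1)` loop of combine_vertically: scan the
-- REVERSED newcolumn (Python indexes it from the back) for the first truthy
-- (non-None) entry; returns the updated reversed column and whether the
-- current cell was merged (newcell = None).
def vBacktrack (cell : Int) (cond : Bool) : List (Option (List Int)) → List (Option (List Int)) × Bool
  | [] => ([], false)                               -- IndexError: pass
  | none :: rest =>
      let r := vBacktrack cell cond rest
      (none :: r.1, r.2)
  | some l :: rest =>
      if l.getD 0 0 = cell ∧ cond = true
      then (some (l.set 2 (l.getD 2 0 + 1)) :: rest, true)   -- newcolumn[backtrack][2] += 1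
      else (some l :: rest, false)

-- the enumerate(column) loop; acc is the reversed newcolumn
def vGo (flag : Bool) : Nat → List (Option (List Int)) → List Int → List (Option (List Int))
  | _, acc, [] => acc.reverse
  | rowno, acc, cell :: rest =>
      let p := vBacktrack cell (decide (rowno % 2 = 1) || flag) acc
      vGo flag (rowno + 1) ((if p.2 then none else some [cell, 1, 1]) :: p.1) rest

def combine_vertically (flag : Bool) (grid : List (List Int)) : List (List (Option (List Int))) :=
  transposeZip none ((transposeZip 0 grid).map (fun column => vGo flag 0 [] column))

-- the `for backtrack in count(-1,-1)` loop of combine_horizontally: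
-- row[colno-backtrack] (backtrack = -1, -2, …) scans FORWARD from colno+1 for
-- the first non-None entry; returns the updated tail of the row and whether
-- row[colno] was set to None.
def hScan (v : Option Int) (cspan rspan : Int) : List (Option (List Int)) → List (Option (List Int)) × Bool
  | [] => ([], false)                               -- IndexError: pass
  | none :: rest =>
      let r := hScan v cspan rspan rest
      (none :: r.1, r.2)
  | some l :: rest =>
      if some (l.getD 0 0) = v ∧ l.getD 2 0 = rspan
      then (some (l.set 1 (l.getD 1 0 + cspan)) :: rest, true)   -- row[..][1] += colspan
      else (some l :: rest, false)

theorem hScan_len (v : Option Int) (cspan rspan : Int) (l : List (Option (List Int))) :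
    (hScan v cspan rspan l).1.length = l.length := by
  induction l with
  | nil => simp [hScan]
  | cons c rest ih =>
      cases c with
      | none => simpa [hScan] using ih
      | some x =>
          simp only [hScan]
          split <;> simp

-- unpack_cell: a None cell unpacks to (None, 1, 1); every list cell here is a
-- 3-list [value, colspan, rowspan], so indexing via getD is exact.
def unpackCell (cell : Option (List Int)) : Option Int × Int × Int :=
  match cell with
  | some l => (some (l.getD 0 0), l.getD 1 0, l.getD 2 0)
  | none => (none, 1, 1)

-- the enumerate(row) loop; acc is the reversed processed prefix of the row
def hLoop (acc : List (Option (List Int))) : List (Option (List Int)) → List (Option (List Int))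
  | [] => acc.reverse
  | cell :: rest =>
      let u := unpackCell cell
      let p := hScan u.1 u.2.1 u.2.2 rest
      hLoop ((if p.2 then none else cell) :: acc) p.1
termination_by l => l.length
decreasing_by simp [hScan_len]

def combine_horizontally (g : List (List (Option (List Int)))) : List (List (Option (List Int))) :=
  g.map (fun row => hLoop [] row)

def combine_repeats (grid : List (List Int)) (odd_vertical_combine : Bool) : List (List (Option (List Int))) :=
  combine_horizontally (combine_vertically odd_vertical_combine grid)

-- ===== PORT B =====

-- _vmerge's loop over rows 1..: the pending run (v0, rowspan n) is emitted
-- head-first followed by its n-1 padding Nones the moment it closes.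
def vgo (flag : Bool) : Nat → Int → Nat → List Int → List (Option (List Int))
  | _, v0, n, [] => some [v0, 1, (n : Int)] :: List.replicate (n - 1) none
  | rowno, v0, n, v :: rest =>
      if v0 = v ∧ (decide (rowno % 2 = 1) || flag) = true
      then vgo flag (rowno + 1) v0 (n + 1) rest
      else some [v0, 1, (n : Int)] :: (List.replicate (n - 1) none ++ vgo flag (rowno + 1) v 1 rest)

def vmerge (flag : Bool) : List Int → List (Option (List Int))
  | [] => []
  | v :: rest => vgo flag 1 v 1 rest

-- _hmerge's loop: pending cell (v, c, r) and the count `gap` of Nones seen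
-- since it; a matching cell absorbs the pending colspan, otherwise the pending
-- cell is emitted followed by its gap Nones.
def hgo : Int → Int → Int → Nat → List (Option (List Int)) → List (Option (List Int))
  | v, c, r, gap, [] => some [v, c, r] :: List.replicate gap none
  | v, c, r, gap, none :: rest => hgo v c r (gap + 1) rest
  | v, c, r, gap, some l :: rest =>
      if v = l.getD 0 0 ∧ r = l.getD 2 0
      then none :: (List.replicate gap none ++ hgo v (c + l.getD 1 0) r 0 rest)
      else some [v, c, r] :: (List.replicate gap none ++ hgo (l.getD 0 0) (l.getD 1 0) (l.getD 2 0) 0 rest)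

-- leading Nones pass through; the first cell starts the pending state
def hmerge : List (Option (List Int)) → List (Option (List Int))
  | [] => []
  | none :: rest => none :: hmerge rest
  | some l :: rest => hgo (l.getD 0 0) (l.getD 1 0) (l.getD 2 0) 0 rest

def combine_repeats_alt (grid : List (List Int)) (odd_vertical_combine : Bool) : List (List (Option (List Int))) :=
  let ncols := ((grid.map List.length).min?).getD 0
  if ncols = 0 then []
  else
    let columns := (List.range ncols).map (fun c => vmerge odd_vertical_combine (grid.map (fun row => row.getD c 0)))
    (List.range grid.length).map (fun r => hmerge (columns.map (fun col => col.getD r none)))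

-- ===== PRECONDITION & SPEC =====
def Spec_combine_repeats (grid : List (List Int)) (odd_vertical_combine : Bool) (out : List (List (Option (List Int)))) : Prop := out = combine_repeats_alt grid odd_vertical_combine
instance (grid : List (List Int)) (odd_vertical_combine : Bool) (out : List (List (Option (List Int)))) : Decidable (Spec_combine_repeats grid odd_vertical_combine out) := by unfold Spec_combine_repeats; infer_instance

-- ===== CLAIM (what is proved, stated in full; the proofs are below) =====
def Claim_equal_combine_repeats : Prop := ∀ (grid : List (List Int)) (odd_vertical_combine : Bool), Dom_combine_repeats grid odd_vertical_combine → Spec_combine_repeats grid odd_vertical_combine (combine_repeats grid odd_vertical_combine)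

-- ===== LEMMAS AND PROOFS =====

-- proof-side description of A's reversed newcolumn when the pending run is (v0, n)
def bFlushV (v0 : Int) (n : Nat) (acc : List (Option (List Int))) : List (Option (List Int)) :=
  List.replicate (n - 1) none ++ some [v0, 1, (n : Int)] :: acc

theorem vBacktrack_rep (cell : Int) (cond : Bool) (k : Nat) (l : List Int) (rest : List (Option (List Int))) :
    vBacktrack cell cond (List.replicate k none ++ some l :: rest) =
      (List.replicate k none ++ (vBacktrack cell cond (some l :: rest)).1,
       (vBacktrack cell cond (some l :: rest)).2) := by
  induction k with
  | zero => simp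
  | succ k ih => simp [List.replicate_succ, vBacktrack, ih]

theorem vBacktrack_flush (cell : Int) (cond : Bool) (v0 : Int) (n : Nat) (acc : List (Option (List Int))) :
    vBacktrack cell cond (bFlushV v0 n acc) =
      if v0 = cell ∧ cond = true
      then (List.replicate (n - 1) none ++ some [v0, 1, (n : Int) + 1] :: acc, true)
      else (bFlushV v0 n acc, false) := by
  rw [bFlushV, vBacktrack_rep]
  by_cases h : v0 = cell ∧ cond = true <;>
    simp [vBacktrack, h, List.set]

theorem cons_flush (v0 : Int) (n : Nat) (hn : 1 ≤ n) (acc : List (Option (List Int))) :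
    (none : Option (List Int)) :: (List.replicate (n - 1) none ++ some [v0, 1, (n : Int) + 1] :: acc)
      = bFlushV v0 (n + 1) acc := by
  rw [bFlushV, show ((n + 1 : Nat) - 1) = (n - 1) + 1 from by omega, List.replicate_succ]
  push_cast
  rfl

theorem vGo_eq (flag : Bool) :
    ∀ (rest : List Int) (rowno : Nat) (acc : List (Option (List Int))) (v0 : Int) (n : Nat), 1 ≤ n →
      vGo flag rowno (bFlushV v0 n acc) rest = acc.reverse ++ vgo flag rowno v0 n rest := by
  intro rest
  induction rest with
  | nil =>
      intro rowno acc v0 n hn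
      simp [vGo, vgo, bFlushV]
  | cons cell rest ih =>
      intro rowno acc v0 n hn
      rw [vGo, vBacktrack_flush, vgo]
      by_cases h : v0 = cell ∧ (decide (rowno % 2 = 1) || flag) = true
      · rw [if_pos h, if_pos h]
        have step : ((if (List.replicate (n - 1) none ++ some [v0, 1, (n : Int) + 1] :: acc,
              true).2 then none else some [cell, 1, 1]) ::
              (List.replicate (n - 1) none ++ some [v0, 1, (n : Int) + 1] :: acc, true).1)
            = bFlushV v0 (n + 1) acc := by
          simpa using cons_flush v0 n hn acc
        rw [step, ih (rowno + 1) acc v0 (n + 1) (by omega)]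
      · rw [if_neg h, if_neg h]
        have step : ((if (bFlushV v0 n acc, false).2 then none else some [cell, 1, 1]) ::
              (bFlushV v0 n acc, false).1) = bFlushV cell 1 (bFlushV v0 n acc) := by
          simp [bFlushV]
        rw [step, ih (rowno + 1) (bFlushV v0 n acc) cell 1 (le_refl 1), bFlushV]
        simp

theorem vGo_eq_vmerge (flag : Bool) (col : List Int) :
    vGo flag 0 [] col = vmerge flag col := by
  cases col with
  | nil => rfl
  | cons v rest =>
      rw [vGo, vmerge]
      have : (vBacktrack v (decide (0 % 2 = 1) || flag) []) = ([], false) := rfl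
      rw [this]
      simpa [bFlushV] using vGo_eq flag rest 1 [] v 1 (le_refl 1)

def WF3 (c : Option (List Int)) : Prop := ∀ l, c = some l → ∃ a b cc, l = [a, b, cc]

theorem hScan_none (cs rs : Int) (l : List (Option (List Int))) :
    hScan none cs rs l = (l, false) := by
  induction l with
  | nil => rfl
  | cons c rest ih =>
      cases c with
      | none => simp [hScan, ih]
      | some x => simp [hScan]

theorem hgo_eq : ∀ (rem : List (Option (List Int))),
    (∀ c ∈ rem, WF3 c) → ∀ (accB : List (Option (List Int))) (v0 c0 r0 : Int) (gap : Nat),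
    hLoop (List.replicate gap none ++ (if (hScan (some v0) c0 r0 rem).2 then none else some [v0, c0, r0]) :: accB)
          (hScan (some v0) c0 r0 rem).1
      = accB.reverse ++ hgo v0 c0 r0 gap rem := by
  intro rem
  induction rem with
  | nil =>
      intro _ accB v0 c0 r0 gap
      simp [hScan, hLoop, hgo]
  | cons cell rem ih =>
      intro wf accB v0 c0 r0 gap
      have wf' : ∀ c ∈ rem, WF3 c := fun c hc => wf c (List.mem_cons_of_mem _ hc)
      cases cell with
      | none =>
          rw [show hScan (some v0) c0 r0 (none :: rem)
              = (none :: (hScan (some v0) c0 r0 rem).1, (hScan (some v0) c0 r0 rem).2) from rfl]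
          rw [hLoop]
          simp only [unpackCell, hScan_none]
          have := ih wf' accB v0 c0 r0 (gap + 1)
          rw [List.replicate_succ] at this
          simpa [hgo] using this
      | some l =>
          obtain ⟨a, b, c, rfl⟩ := wf (some l) List.mem_cons_self l rfl
          by_cases h : v0 = a ∧ r0 = c
          · obtain ⟨rfl, rfl⟩ := h
            have hsc : hScan (some v0) c0 r0 (some [v0, b, r0] :: rem)
                = (some [v0, b + c0, r0] :: rem, true) := by
              simp [hScan, List.set]
            have key := ih wf' (List.replicate gap none ++ none :: accB) v0 (b + c0) r0 0
            simp only [List.replicate, List.nil_append] at key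
            rw [hsc, hLoop]
            simp only [unpackCell, List.getD_cons_zero, List.getD_cons_succ, if_true]
            rw [key, hgo]
            simp [Int.add_comm b c0]
          · have hsc : hScan (some v0) c0 r0 (some [a, b, c] :: rem)
                = (some [a, b, c] :: rem, false) := by
              have : ¬ (some ([a, b, c].getD 0 0) = some v0 ∧ ([a, b, c].getD 2 0 : Int) = r0) := by
                simp only [List.getD_cons_zero, List.getD_cons_succ, Option.some_inj]
                intro hcon
                exact h ⟨hcon.1.symm, hcon.2.symm⟩
              rw [hScan, if_neg this]
            have key := ih wf' (List.replicate gap none ++ some [v0, c0, r0] :: accB) a b c 0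
            simp only [List.replicate, List.nil_append] at key
            rw [hsc, hLoop]
            simp only [unpackCell, List.getD_cons_zero, List.getD_cons_succ,
              Bool.false_eq_true, if_false]
            rw [key, hgo]
            simp only [List.getD_cons_zero, List.getD_cons_succ]
            rw [if_neg h]
            simp

theorem hLoop_acc : ∀ (row : List (Option (List Int))), (∀ c ∈ row, WF3 c) →
    ∀ acc, hLoop acc row = acc.reverse ++ hmerge row := by
  intro row
  induction row with
  | nil => intro _ acc; simp [hLoop, hmerge]
  | cons cell rem ih =>
      intro wf acc
      have wf' : ∀ c ∈ rem, WF3 c := fun c hc => wf c (List.mem_cons_of_mem _ hc)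
      cases cell with
      | none =>
          rw [hLoop]
          simp only [unpackCell, hScan_none, ite_self]
          rw [ih wf' (none :: acc), hmerge]
          simp
      | some l =>
          obtain ⟨a, b, c, rfl⟩ := wf (some l) List.mem_cons_self l rfl
          rw [hLoop]
          simp only [unpackCell, List.getD_cons_zero, List.getD_cons_succ]
          have := hgo_eq rem wf' acc a b c 0
          simp only [List.replicate, List.nil_append] at this
          rw [this, hmerge]
          simp

theorem vgo_wf (flag : Bool) : ∀ (col : List Int) (rowno : Nat) (v0 : Int) (n : Nat),
    ∀ x ∈ vgo flag rowno v0 n col, WF3 x := by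
  intro col
  induction col with
  | nil =>
      intro rowno v0 n x hx
      rw [vgo] at hx
      rcases List.mem_cons.1 hx with rfl | h
      · exact fun l hl => ⟨v0, 1, (n : Int), by simpa using hl.symm⟩
      · rw [List.eq_of_mem_replicate h]; intro l hl; simp at hl
  | cons v rest ih =>
      intro rowno v0 n x hx
      rw [vgo] at hx
      split at hx
      · exact ih (rowno + 1) v0 (n + 1) x hx
      · rcases List.mem_cons.1 hx with rfl | h
        · exact fun l hl => ⟨v0, 1, (n : Int), by simpa using hl.symm⟩
        · rcases List.mem_append.1 h with h | h
          · rw [List.eq_of_mem_replicate h]; intro l hl; simp at hl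
          · exact ih (rowno + 1) v 1 x h

theorem vmerge_wf (flag : Bool) (col : List Int) : ∀ x ∈ vmerge flag col, WF3 x := by
  cases col with
  | nil => intro x hx; simp [vmerge] at hx
  | cons v rest => exact vgo_wf flag rest 1 v 1

theorem vgo_len (flag : Bool) : ∀ (col : List Int) (rowno : Nat) (v0 : Int) (n : Nat), 1 ≤ n →
    (vgo flag rowno v0 n col).length = n + col.length := by
  intro col
  induction col with
  | nil => intro rowno v0 n hn; simp [vgo]; omega
  | cons v rest ih =>
      intro rowno v0 n hn
      rw [vgo]
      split
      · rw [ih (rowno + 1) v0 (n + 1) (by omega)]; simp; omega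
      · simp [ih (rowno + 1) v 1 (le_refl 1)]; omega

theorem vmerge_len (flag : Bool) (col : List Int) : (vmerge flag col).length = col.length := by
  cases col with
  | nil => rfl
  | cons v rest =>
      have := vgo_len flag rest 1 v 1 (le_refl 1)
      rw [vmerge, this]
      simp [Nat.add_comm]

theorem min?_replicate (x n : Nat) (hn : 0 < n) : (List.replicate n x).min? = some x := by
  induction n with
  | zero => omega
  | succ n ih =>
      rcases Nat.eq_zero_or_pos n with h | h
      · subst h; simp
      · rw [List.replicate_succ, List.min?_cons, ih h]
        simp

theorem transposeZip_ne {α : Type} (d : α) (g : List (List α)) (hg : g ≠ []) :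
    transposeZip d g = (List.range (((g.map List.length).min?).getD 0)).map
      (fun i => g.map (fun row => row.getD i d)) := by
  cases g with
  | nil => exact absurd rfl hg
  | cons r rs => rfl

theorem getD_wf (col : List (Option (List Int))) (r : Nat)
    (hcol : ∀ x ∈ col, WF3 x) : WF3 (col.getD r none) := by
  intro l hl
  rw [List.getD_eq_getElem?_getD] at hl
  cases hx : col[r]? with
  | none => rw [hx] at hl; simp at hl
  | some x =>
      rw [hx] at hl
      simp at hl
      subst hl
      exact hcol _ (List.mem_of_getElem? hx) l rfl

-- ===== VERDICT (by name: the statement is the Claim_ definition above) =====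
theorem combine_repeats_spec : Claim_equal_combine_repeats := by
  intro grid flag _
  show combine_repeats grid flag = combine_repeats_alt grid flag
  rw [combine_repeats, combine_horizontally, combine_vertically, combine_repeats_alt]
  by_cases h0 : ((grid.map List.length).min?).getD 0 = 0
  · rw [if_pos h0]
    cases grid with
    | nil => rfl
    | cons r rs =>
        rw [transposeZip_ne 0 _ (by simp), h0]
        rfl
  · rw [if_neg h0]
    have hgne : grid ≠ [] := by
      intro h
      subst h
      simp at h0
    rw [transposeZip_ne 0 grid hgne, List.map_map]
    have hNG : (List.range (((grid.map List.length).min?).getD 0)).map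
          ((fun column => vGo flag 0 [] column) ∘ fun i => grid.map (fun row => row.getD i 0))
        = (List.range (((grid.map List.length).min?).getD 0)).map
          (fun c => vmerge flag (grid.map (fun row => row.getD c 0))) := by
      apply List.map_congr_left
      intro c _
      exact vGo_eq_vmerge flag _
    rw [hNG]
    have hcolsne : (List.range (((grid.map List.length).min?).getD 0)).map
        (fun c => vmerge flag (grid.map (fun row => row.getD c 0))) ≠ [] := by
      simp [List.range_eq_nil]
      omega
    rw [transposeZip_ne none _ hcolsne]
    have hlens : ((List.range (((grid.map List.length).min?).getD 0)).map
          (fun c => vmerge flag (grid.map (fun row => row.getD c 0)))).map List.length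
        = List.replicate (((grid.map List.length).min?).getD 0) grid.length := by
      rw [List.map_map]
      have hconst : ∀ c ∈ List.range (((grid.map List.length).min?).getD 0),
          (List.length ∘ fun c => vmerge flag (grid.map (fun row => row.getD c 0))) c
            = grid.length := by
        intro c _
        simp [vmerge_len]
      rw [List.map_congr_left hconst, List.map_const', List.length_range]
    rw [hlens, min?_replicate _ _ (by omega)]
    simp only [Option.getD_some]
    rw [List.map_map]
    apply List.map_congr_left
    intro r _
    rw [Function.comp]
    have wf : ∀ c ∈ ((List.range (((grid.map List.length).min?).getD 0)).map
        (fun c => vmerge flag (grid.map (fun row => row.getD c 0)))).map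
          (fun col => col.getD r none), WF3 c := by
      intro c hc
      simp only [List.mem_map] at hc
      obtain ⟨col, hcol, rfl⟩ := hc
      obtain ⟨i, _, rfl⟩ := hcol
      exact getD_wf _ r (vmerge_wf flag _)
    simpa using hLoop_acc _ wf []
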